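-- pv_equiv track=rewrite | github.com/Enuang/Sensitive-words-recognition | init.py | AC
-- ===== SOURCE A (Python) =====
-- def AC(step, length, word, st, result):
--     # 递归，建立各类敏感词的变形形式
--     if step == length:
--         result.append(st)
--         return
--     else:
--         for i in range(len(word[step])):
--             if i != 0:
--                 AC(step + 1, length, word, st + word[step][i], result)
--     return result
-- ===== SOURCE B (Python) =====
-- def AC(step, length, word, st, result):
--     # Two staged passes instead of recursion: first gather the variant tails
--     # (word[i][1:]) for positions step..length-1 (stopping at an empty tail,
--     # which makes any further positions unreachable), then fold a Cartesian
--     # product over the gathered tails and extend result once.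
--     tails = []
--     i = step
--     while i != length:
--         t = word[i][1:]
--         tails.append(t)
--         if not t:
--             break
--         i += 1
--     combos = [st]
--     for t in tails:
--         combos = [c + w for c in combos for w in t]
--     result.extend(combos)
--     return result
-- ===== Notes on version B (the rewrite author's own statement) =====
-- stated objective: alternative
-- what changed: Replaces the recursive depth-first enumeration with two staged passes: first gather the variant tails word[i][1:] for the needed positions into a list, then fold a Cartesian product over that list and extend result once.
-- outside the precondition, e.g. on AC(1, 1, [['a']], 'x', []): A returns None, B returns ['x']
import Mathlib
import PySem

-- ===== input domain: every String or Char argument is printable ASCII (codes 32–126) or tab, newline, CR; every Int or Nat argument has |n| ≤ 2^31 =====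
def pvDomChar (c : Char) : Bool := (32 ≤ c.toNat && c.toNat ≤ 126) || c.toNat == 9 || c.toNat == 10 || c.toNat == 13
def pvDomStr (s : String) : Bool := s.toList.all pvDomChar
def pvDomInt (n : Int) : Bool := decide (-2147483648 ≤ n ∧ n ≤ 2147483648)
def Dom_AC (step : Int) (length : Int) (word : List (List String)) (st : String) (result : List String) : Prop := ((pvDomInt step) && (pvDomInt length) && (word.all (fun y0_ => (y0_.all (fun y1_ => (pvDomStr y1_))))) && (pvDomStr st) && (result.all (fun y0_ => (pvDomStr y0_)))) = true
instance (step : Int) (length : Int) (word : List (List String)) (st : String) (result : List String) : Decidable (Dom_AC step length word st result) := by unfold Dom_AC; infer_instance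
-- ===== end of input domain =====

-- B replaces A's recursion by two staged passes (gather the variant tails, then fold a
-- Cartesian product over them); equivalence is about the returned list (in Python, A and B
-- both also append the same produced strings to `result` in place).

-- ===== PORT A =====
-- Literal port of A's recursion; `fuel` only makes the recursion well-founded (the initial
-- fuel below bounds the walk's depth on every input on which the Python recursion
-- terminates, so the 0-fuel case is never reached there).
def ACgo (fuel : Nat) (step : Int) (length : Int) (word : List (List String)) (st : String) (result : List String) : List String :=
  match fuel with
  | 0 => result
  | Nat.succ f =>
    if step = length then result ++ [st]
    else
      match PySem.List.pyGet? word step with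
      | none => result   -- Python raises IndexError here (outside Pre_AC)
      | some row =>
        (List.range row.length).foldl
          (fun res i => if i ≠ 0 then ACgo f (step + 1) length word (st ++ row.getD i "") res else res)
          result

def AC (step : Int) (length : Int) (word : List (List String)) (st : String) (result : List String) : List String :=
  ACgo ((length - step).toNat + word.length + step.natAbs + 1) step length word st result

-- ===== PORT B =====
-- Pass 1 of Source B: gather the tails word[i][1:] for i = step, step+1, … until i == length or
-- a tail is empty.  `fuel` makes the while loop well-founded; the 0-fuel and out-of-range
-- branches (where Python raises IndexError, outside Pre_AC) emit an empty tail, which makes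
-- the product below empty — neither is reachable inside Pre_AC.
def ACtails (fuel : Nat) (i : Int) (length : Int) (word : List (List String)) (acc : List (List String)) : List (List String) :=
  match fuel with
  | 0 => acc ++ [[]]
  | Nat.succ f =>
    if i = length then acc
    else
      match PySem.List.pyGet? word i with
      | none => acc ++ [[]]   -- Python raises IndexError here (outside Pre_AC)
      | some row =>
        let t := PySem.List.slice row (some 1) none
        if t = [] then acc ++ [t]
        else ACtails f (i + 1) length word (acc ++ [t])

-- Pass 2 of Source B: one product step, `combos = [c + w for c in combos for w in t]`.
def ACexpand (combos : List String) (t : List String) : List String :=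
  combos.flatMap (fun c => t.map (fun w => c ++ w))

def AC_alt (step : Int) (length : Int) (word : List (List String)) (st : String) (result : List String) : List String :=
  result ++
    (ACtails ((length - step).toNat + word.length + step.natAbs + 1) step length word []).foldl
      ACexpand [st]

-- ===== PRECONDITION & SPEC =====
-- Pre_AC is exactly the inputs on which Python A returns a list: it excludes step == length
-- (A appends st but returns None, not a list) and the inputs on which A's walk runs off the
-- end of word and raises IndexError (no row with ≤ 1 variants and no stop at `length` before
-- an out-of-range index).
def Pre_AC (step : Int) (length : Int) (word : List (List String)) (st : String) (result : List String) : Prop :=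
  -(word.length : Int) ≤ step ∧ step ≠ length ∧
    ((step < length ∧ length ≤ (word.length : Int)) ∨
      ∃ j ∈ List.range ((word.length : Int) - step).toNat,
        (PySem.List.pyGetD word (step + j) []).length ≤ 1 ∧
          ¬(step < length ∧ length ≤ step + j))
instance (step : Int) (length : Int) (word : List (List String)) (st : String) (result : List String) : Decidable (Pre_AC step length word st result) := by unfold Pre_AC; infer_instance

def pvWitness_AC : Int × Int × List (List String) × String × List String :=
  (0, 1, [["a", "b", "c"]], "x", ["seed"])

def Spec_AC (step : Int) (length : Int) (word : List (List String)) (st : String) (result : List String) (out : List String) : Prop := out = AC_alt step length word st result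
instance (step : Int) (length : Int) (word : List (List String)) (st : String) (result : List String) (out : List String) : Decidable (Spec_AC step length word st result out) := by unfold Spec_AC; infer_instance

-- ===== CLAIM (what is proved, stated in full; the proofs are below) =====
def Claim_equal_AC : Prop := ∀ (step : Int) (length : Int) (word : List (List String)) (st : String) (result : List String), Dom_AC step length word st result → Pre_AC step length word st result → Spec_AC step length word st result (AC step length word st result)

-- ===== LEMMAS AND PROOFS =====
-- The two ports are proved equal outright (the Pre_ hypothesis is not needed for the port
-- equality itself: it delimits where port A is faithful to Python A, which returns None or
-- raises outside it): a fuel-indexed bisimulation between A's recursion and B's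
-- gather-then-fold pipeline.

-- ACtails only ever appends to its accumulator.
lemma ACtails_acc (length : Int) (word : List (List String)) :
    ∀ fuel : Nat, ∀ i : Int, ∀ acc : List (List String),
      ACtails fuel i length word acc = acc ++ ACtails fuel i length word [] := by
  intro fuel
  induction fuel with
  | zero => intro i acc; simp [ACtails]
  | succ f ih =>
    intro i acc
    by_cases hil : i = length
    · simp [ACtails, hil]
    · cases hget : PySem.List.pyGet? word i with
      | none => simp [ACtails, hil, hget]
      | some row =>
        simp only [ACtails, if_neg hil, hget]
        by_cases ht : PySem.List.slice row (some 1) none = []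
        · simp [ht]
        · simp only [if_neg ht]
          rw [ih (i + 1) (acc ++ [PySem.List.slice row (some 1) none]),
            ih (i + 1) ([] ++ [PySem.List.slice row (some 1) none]), List.append_assoc]
          simp

-- One product step distributes over append …
lemma ACexpand_append (xs ys t : List String) :
    ACexpand (xs ++ ys) t = ACexpand xs t ++ ACexpand ys t := by
  simp [ACexpand]

-- … hence the whole fold does too …
lemma fold_expand_append (ts : List (List String)) :
    ∀ xs ys : List String,
      ts.foldl ACexpand (xs ++ ys) = ts.foldl ACexpand xs ++ ts.foldl ACexpand ys := by
  induction ts with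
  | nil => intro xs ys; simp
  | cons t ts ih =>
    intro xs ys
    simp only [List.foldl_cons, ACexpand_append]
    exact ih _ _

-- … and is therefore linear in the starting combination list.
lemma fold_expand_flatMap (ts : List (List String)) :
    ∀ cs : List String, ts.foldl ACexpand cs = cs.flatMap (fun c => ts.foldl ACexpand [c]) := by
  intro cs
  induction cs with
  | nil =>
    induction ts with
    | nil => simp
    | cons t ts ih => simpa [ACexpand] using ih
  | cons c cs ih =>
    have : (c :: cs) = [c] ++ cs := rfl
    rw [this, fold_expand_append]
    simp [ih]

lemma foldl_append_filter {α : Type} (p : α → Prop) [DecidablePred p] (h : α → List String)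
    (l : List α) :
    ∀ acc : List String,
      l.foldl (fun acc x => if p x then acc ++ h x else acc) acc =
        acc ++ (l.filter (fun x => decide (p x))).flatMap h := by
  induction l with
  | nil => intro acc; simp
  | cons x xs ih =>
    intro acc
    by_cases hx : p x <;> simp [hx, ih, List.append_assoc]

lemma range_getD_flatMap (F : String → List String) :
    ∀ l : List String, (List.range l.length).flatMap (fun j => F (l.getD j "")) = l.flatMap F := by
  intro l
  induction l with
  | nil => simp
  | cons y ys ih =>
    simp only [List.length_cons, List.range_succ_eq_map, List.flatMap_cons, List.flatMap_map]
    simpa using congrArg (F y ++ ·) ih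

lemma range_skip0_flatMap (F : String → List String) (l : List String) :
    ((List.range l.length).filter (fun i => decide (i ≠ 0))).flatMap (fun i => F (l.getD i "")) =
      (l.drop 1).flatMap F := by
  cases l with
  | nil => simp
  | cons y ys =>
    simp only [List.length_cons, List.range_succ_eq_map, List.filter_cons, List.filter_map]
    have hfil : (List.range ys.length).filter ((fun i => decide (i ≠ 0)) ∘ Nat.succ) =
        List.range ys.length := by
      apply List.filter_eq_self.2; intro a _; simp
    simp only [hfil]
    simp only [decide_not, decide_true, Bool.not_true, Bool.false_eq_true, if_false,
      List.flatMap_map]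
    simpa using range_getD_flatMap F ys

-- The bisimulation: with the same fuel, A's depth-first recursion from (st, res) produces
-- exactly res ++ (the product of the tails B gathers, started on the single combination [st]).
lemma ACgo_bisim (word : List (List String)) (length : Int) :
    ∀ fuel : Nat, ∀ s : Int, ∀ st : String, ∀ res : List String,
      ACgo fuel s length word st res =
        res ++ (ACtails fuel s length word []).foldl ACexpand [st] := by
  intro fuel
  induction fuel with
  | zero => intro s st res; simp [ACgo, ACtails, ACexpand]
  | succ f ih =>
    intro s st res
    by_cases hsl : s = length
    · simp [ACgo, ACtails, hsl]
    · cases hget : PySem.List.pyGet? word s with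
      | none => simp [ACgo, ACtails, hsl, hget, ACexpand]
      | some row =>
        simp only [ACgo, ACtails, if_neg hsl, hget]
        have hfun : (fun (r : List String) (i : Nat) =>
              if i ≠ 0 then ACgo f (s + 1) length word (st ++ row.getD i "") r else r) =
            (fun (r : List String) (i : Nat) =>
              if i ≠ 0 then
                r ++ (ACtails f (s + 1) length word []).foldl ACexpand [st ++ row.getD i ""]
              else r) := by
          funext r i
          by_cases hi : i = 0
          · simp [hi]
          · simp only [hi, ne_eq, not_false_iff, if_true]
            exact ih (s + 1) (st ++ row.getD i "") r
        rw [hfun,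
          foldl_append_filter (fun i => i ≠ 0)
            (fun i => (ACtails f (s + 1) length word []).foldl ACexpand [st ++ row.getD i ""])
            (List.range row.length) res,
          range_skip0_flatMap
            (fun w => (ACtails f (s + 1) length word []).foldl ACexpand [st ++ w]) row]
        have hdrop : PySem.List.slice row (some 1) none = row.drop 1 := by
          rw [PySem.List.slice_from_one]; cases row <;> rfl
        by_cases ht : PySem.List.slice row (some 1) none = []
        · have h1 : row.drop 1 = [] := by rw [← hdrop]; exact ht
          simp [ht, h1, ACexpand]
        · rw [if_neg ht,
            ACtails_acc length word f (s + 1) ([] ++ [PySem.List.slice row (some 1) none])]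
          simp only [List.nil_append, List.foldl_append, List.foldl_cons, List.foldl_nil]
          rw [fold_expand_flatMap (ACtails f (s + 1) length word [])
            (ACexpand [st] (PySem.List.slice row (some 1) none))]
          simp only [ACexpand, hdrop]
          cases row with
          | nil => simp
          | cons y ys => simp [List.flatMap_map]

-- ===== VERDICT (by name: the statement is the Claim_ definition above) =====
theorem AC_spec : Claim_equal_AC := by
  intro step length word st result _ _
  show AC step length word st result = AC_alt step length word st result
  unfold AC AC_alt
  exact ACgo_bisim word length ((length - step).toNat + word.length + step.natAbs + 1) step st result
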